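-- pv_equiv track=rewrite | github.com/NearVanilla/configuration | server_manager/config/substitutions.py | _get_trailing_whitespace
-- ===== SOURCE A (Python) =====
-- import string
--
-- def _get_trailing_whitespace(content: str) -> str:
--     """Get all trailing whitespace characters from given content
--
--     >>> _get_trailing_whitespace("")
--     ''
--     >>> _get_trailing_whitespace("abc\ndef\nghi")
--     ''
--     >>> _get_trailing_whitespace("abc\ndef\nghi\n")
--     '\n'
--     >>> _get_trailing_whitespace("abc\ndef\nghi\n\n\n")
--     '\n\n\n'
--     """
--     ws = set(string.whitespace)
--     result = []
--     for char in reversed(content):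
--         if char in ws:
--             result.append(char)
--         else:
--             break
--     return "".join(reversed(result))
-- ===== SOURCE B (Python) =====
-- import string
--
-- def _get_trailing_whitespace(content: str) -> str:
--     return content[len(content.rstrip(string.whitespace)):]
-- ===== Notes on version B (the rewrite author's own statement) =====
-- stated objective: idiomatic
-- what changed: Replaces the explicit reversed-iteration loop that collects whitespace characters and re-reverses them with a single rstrip(string.whitespace) to find the boundary index and one slice of the original string.
import Mathlib
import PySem

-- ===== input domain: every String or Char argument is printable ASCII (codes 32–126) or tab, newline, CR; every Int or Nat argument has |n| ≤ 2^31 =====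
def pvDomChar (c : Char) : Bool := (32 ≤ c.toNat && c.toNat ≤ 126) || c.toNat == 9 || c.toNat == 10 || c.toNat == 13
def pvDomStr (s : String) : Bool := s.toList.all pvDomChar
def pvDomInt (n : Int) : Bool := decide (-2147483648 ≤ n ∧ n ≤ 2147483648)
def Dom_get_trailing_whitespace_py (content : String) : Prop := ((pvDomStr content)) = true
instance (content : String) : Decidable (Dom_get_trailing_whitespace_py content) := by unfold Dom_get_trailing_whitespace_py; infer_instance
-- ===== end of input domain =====

-- B computes the same trailing-whitespace suffix by one rstrip + slice instead of A's
-- reversed collect-and-re-reverse loop (objective: idiomatic; same cost).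

-- ===== PORT A =====
-- ws = set(string.whitespace)  (string.whitespace = " \t\n\r\x0B\x0C")
def pvWsA : PySem.Set Char := PySem.Set.ofList " \t\n\r\x0B\x0C".toList

-- the 'for char in reversed(content): if char in ws: result.append(char) else: break' loop
def pvLoopA : List Char → List Char → List Char
  | [], result => result
  | c :: rest, result => if pvWsA.contains c then pvLoopA rest (result ++ [c]) else result

def get_trailing_whitespace_py (content : String) : String :=
  String.ofList (pvLoopA content.toList.reverse []).reverse

-- ===== PORT B =====
def pvWsB : List Char := " \t\n\r\x0B\x0C".toList

-- hand port of content.rstrip(string.whitespace): drop characters of the given set from the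
-- right end only (exact: Python's rstrip with an explicit chars argument does exactly this)
def pvRstripChars (s : List Char) : List Char := s.rdropWhile (fun c => pvWsB.contains c)

def get_trailing_whitespace_py_alt (content : String) : String :=
  String.ofList (PySem.List.slice content.toList
    (some ((pvRstripChars content.toList).length : Int)) none)

-- ===== PRECONDITION & SPEC =====
def Spec_get_trailing_whitespace_py (content : String) (out : String) : Prop := out = get_trailing_whitespace_py_alt content
instance (content : String) (out : String) : Decidable (Spec_get_trailing_whitespace_py content out) := by unfold Spec_get_trailing_whitespace_py; infer_instance

-- ===== CLAIM (what is proved, stated in full; the proofs are below) =====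
def Claim_equal_get_trailing_whitespace_py : Prop := ∀ (content : String), Dom_get_trailing_whitespace_py content → Spec_get_trailing_whitespace_py content (get_trailing_whitespace_py content)

-- ===== LEMMAS AND PROOFS =====

-- A's and B's whitespace tests agree (the set literal has no duplicates)
theorem pvWs_contains_eq (c : Char) : pvWsA.contains c = pvWsB.contains c := rfl

theorem pvLoopA_eq (l acc : List Char) :
    pvLoopA l acc = acc ++ l.takeWhile (fun c => pvWsA.contains c) := by
  induction l generalizing acc with
  | nil => simp [pvLoopA]
  | cons c rest ih =>
    by_cases h : c ∈ pvWsA <;>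
      simp [pvLoopA, h, ih]

theorem pv_main (l : List Char) :
    (pvLoopA l.reverse []).reverse = l.drop ((l.rdropWhile (fun c => pvWsB.contains c)).length) := by
  rw [pvLoopA_eq]
  simp only [List.nil_append, List.rdropWhile, ← pvWs_contains_eq, List.length_reverse]
  have hsplit : l = (List.dropWhile (fun c => pvWsA.contains c) l.reverse).reverse ++
      (List.takeWhile (fun c => pvWsA.contains c) l.reverse).reverse := by
    rw [← List.reverse_append, List.takeWhile_append_dropWhile, List.reverse_reverse]
  rw [← List.length_reverse (as := List.dropWhile (fun c => pvWsA.contains c) l.reverse)]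
  nth_rewrite 3 [hsplit]
  rw [List.drop_left]

-- ===== VERDICT (by name: the statement is the Claim_ definition above) =====
theorem get_trailing_whitespace_py_spec : Claim_equal_get_trailing_whitespace_py := by
  intro content _
  unfold Spec_get_trailing_whitespace_py get_trailing_whitespace_py get_trailing_whitespace_py_alt pvRstripChars
  rw [PySem.List.slice_from_natCast, pv_main]
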